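-- pv_equiv track=rewrite | github.com/dylman123/Multi-Agent-RL | STAGE_2/State_Space.py | make_states
-- ===== SOURCE A (Python) =====
-- import itertools
--
-- def make_states(num_agents, coords_type, num_goals, x, y):
--
--     state_space = []
--     goal_table = list(itertools.product([0, 1], repeat=num_goals))  # Goal possibilities in one-hot encoding
--
--     if coords_type == "relative":
--         x_range = range(-x + 1, x)
--         y_range = range(-y + 1, y)
--
--     else:  # if coords_type == "absolute":
--         x_range = range(x)
--         y_range = range(y)
--
--     # Create a large state space using FOR loop iterations
--     if num_agents == 1:
--         for a in x_range:
--             for b in y_range: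
--                     for goal in goal_table:
--                         state_space.append(tuple([a, b] + list(goal)))
--
--     elif num_agents == 2:
--         for a in x_range:
--             for b in y_range:
--                 for c in x_range:
--                     for d in y_range:
--                             for goal in goal_table:
--                                 state_space.append(tuple([a, b, c, d] + list(goal)))
--
--     elif num_agents == 3:
--         for a in x_range:
--             for b in y_range:
--                 for c in x_range:
--                     for d in y_range:
--                         for e in x_range:
--                             for f in y_range:
--                                     for goal in goal_table:
--                                         state_space.append(tuple([a, b, c, d, e, f] + list(goal)))
--
--     elif num_agents == 4:
--         for a in x_range:
--             for b in y_range: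
--                 for c in x_range:
--                     for d in y_range:
--                         for e in x_range:
--                             for f in y_range:
--                                 for g in x_range:
--                                     for h in y_range:
--                                         for goal in goal_table:
--                                             state_space.append(tuple([a, b, c, d, e, f, g, h] + list(goal)))
--     return state_space
-- ===== SOURCE B (Python) =====
-- def make_states(num_agents, coords_type, num_goals, x, y):
--     if num_agents < 1 or num_agents > 4:
--         return []
--     if coords_type == "relative":
--         xs = list(range(-x + 1, x))
--         ys = list(range(-y + 1, y))
--     else:
--         xs = list(range(x))
--         ys = list(range(y))
--     # goal rows from the bits of a counter instead of itertools.product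
--     states = [tuple((i >> (num_goals - 1 - j)) & 1 for j in range(num_goals))
--               for i in range(1 << num_goals)]
--     # grow the space back-to-front: prepend one agent's (a, b) pair per stage
--     for _ in range(num_agents):
--         states = [(a, b) + t for a in xs for b in ys for t in states]
--     return states
-- ===== Notes on version B (the rewrite author's own statement) =====
-- stated objective: alternative
-- what changed: Replaces the four hand-unrolled nested-loop branches and itertools.product with a staged construction: goal rows are decoded from the bits of a counter 0..2^num_goals-1, and the state list is grown back-to-front by prepending one agent's (a,b) coordinate pair per stage in an accumulator loop.
import Mathlib
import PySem

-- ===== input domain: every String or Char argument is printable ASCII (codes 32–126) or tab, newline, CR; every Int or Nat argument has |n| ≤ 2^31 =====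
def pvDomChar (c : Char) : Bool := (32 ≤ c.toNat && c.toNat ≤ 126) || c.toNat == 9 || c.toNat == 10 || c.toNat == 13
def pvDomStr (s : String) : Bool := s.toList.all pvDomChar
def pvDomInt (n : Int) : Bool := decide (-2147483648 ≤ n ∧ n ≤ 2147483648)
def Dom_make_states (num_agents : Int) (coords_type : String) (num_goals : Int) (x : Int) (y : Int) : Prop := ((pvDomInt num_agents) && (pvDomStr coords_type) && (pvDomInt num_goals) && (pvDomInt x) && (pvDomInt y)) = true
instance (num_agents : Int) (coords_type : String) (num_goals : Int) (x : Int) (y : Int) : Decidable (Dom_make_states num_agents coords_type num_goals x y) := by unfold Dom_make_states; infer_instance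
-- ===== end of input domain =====

-- B replaces A's four hand-unrolled nested-loop branches and itertools.product with a
-- staged construction: goal rows decoded from counter bits, then one prepend-stage per agent.


-- ===== PORT A =====
-- list(itertools.product([0, 1], repeat=n)): first position varies slowest
def pvGoalTable : Nat → List (List Int)
  | 0 => [[]]
  | n + 1 => [(0 : Int), 1].flatMap (fun b => (pvGoalTable n).map (fun g => b :: g))

def make_states (num_agents : Int) (coords_type : String) (num_goals : Int) (x : Int) (y : Int) : List (List Int) :=
  let goal_table := pvGoalTable num_goals.toNat
  let x_range := if coords_type = "relative" then PySem.List.pyRange (-x + 1) x 1 else PySem.List.pyRange 0 x 1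
  let y_range := if coords_type = "relative" then PySem.List.pyRange (-y + 1) y 1 else PySem.List.pyRange 0 y 1
  if num_agents = 1 then
    x_range.foldl (fun s a => y_range.foldl (fun s b =>
      goal_table.foldl (fun s goal => s ++ [[a, b] ++ goal]) s) s) []
  else if num_agents = 2 then
    x_range.foldl (fun s a => y_range.foldl (fun s b =>
      x_range.foldl (fun s c => y_range.foldl (fun s d =>
        goal_table.foldl (fun s goal => s ++ [[a, b, c, d] ++ goal]) s) s) s) s) []
  else if num_agents = 3 then
    x_range.foldl (fun s a => y_range.foldl (fun s b =>
      x_range.foldl (fun s c => y_range.foldl (fun s d =>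
        x_range.foldl (fun s e => y_range.foldl (fun s f =>
          goal_table.foldl (fun s goal => s ++ [[a, b, c, d, e, f] ++ goal]) s) s) s) s) s) s) []
  else if num_agents = 4 then
    x_range.foldl (fun s a => y_range.foldl (fun s b =>
      x_range.foldl (fun s c => y_range.foldl (fun s d =>
        x_range.foldl (fun s e => y_range.foldl (fun s f =>
          x_range.foldl (fun s g => y_range.foldl (fun s h =>
            goal_table.foldl (fun s goal => s ++ [[a, b, c, d, e, f, g, h] ++ goal]) s) s) s) s) s) s) s) s) []
  else []

-- ===== PORT B =====
-- tuple((i >> (num_goals-1-j)) & 1 for j in range(num_goals)) for i in range(1 << num_goals)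
def pvBitRow (ng : Nat) (i : Nat) : List Int :=
  (List.range ng).map (fun j => (((i >>> (ng - 1 - j)) &&& 1 : Nat) : Int))

def make_states_alt (num_agents : Int) (coords_type : String) (num_goals : Int) (x : Int) (y : Int) : List (List Int) :=
  if num_agents < 1 ∨ num_agents > 4 then []
  else
    let xs := if coords_type = "relative" then PySem.List.pyRange (-x + 1) x 1 else PySem.List.pyRange 0 x 1
    let ys := if coords_type = "relative" then PySem.List.pyRange (-y + 1) y 1 else PySem.List.pyRange 0 y 1
    let init := (List.range (2 ^ num_goals.toNat)).map (pvBitRow num_goals.toNat)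
    (List.range num_agents.toNat).foldl
      (fun states _ => xs.flatMap (fun a => ys.flatMap (fun b => states.map (fun t => a :: b :: t))))
      init

-- ===== PRECONDITION & SPEC =====
-- A raises ValueError (itertools.product with negative repeat) when num_goals < 0.
def Pre_make_states (num_agents : Int) (coords_type : String) (num_goals : Int) (x : Int) (y : Int) : Prop := 0 ≤ num_goals
instance (num_agents : Int) (coords_type : String) (num_goals : Int) (x : Int) (y : Int) : Decidable (Pre_make_states num_agents coords_type num_goals x y) := by unfold Pre_make_states; infer_instance
def pvWitness_make_states : Int × String × Int × Int × Int := (2, "relative", 2, 2, 2)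

def Spec_make_states (num_agents : Int) (coords_type : String) (num_goals : Int) (x : Int) (y : Int) (out : List (List Int)) : Prop := out = make_states_alt num_agents coords_type num_goals x y
instance (num_agents : Int) (coords_type : String) (num_goals : Int) (x : Int) (y : Int) (out : List (List Int)) : Decidable (Spec_make_states num_agents coords_type num_goals x y out) := by unfold Spec_make_states; infer_instance

-- ===== CLAIM (what is proved, stated in full; the proofs are below) =====
def Claim_equal_make_states : Prop := ∀ (num_agents : Int) (coords_type : String) (num_goals : Int) (x : Int) (y : Int), Dom_make_states num_agents coords_type num_goals x y → Pre_make_states num_agents coords_type num_goals x y → Spec_make_states num_agents coords_type num_goals x y (make_states num_agents coords_type num_goals x y)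

-- ===== LEMMAS AND PROOFS =====

-- a foldl whose step appends a block is init ++ flatMap
theorem pv_foldl_flatMap {α β : Type} (l : List α) (step : List β → α → List β) (g : α → List β)
    (h : ∀ s a, step s a = s ++ g a) : ∀ init, l.foldl step init = init ++ l.flatMap g := by
  induction l with
  | nil => simp
  | cons a t ih => intro init; simp [List.foldl, h, ih, List.flatMap_cons, List.append_assoc]

theorem pv_flatMap_single {α β : Type} (l : List α) (f : α → β) :
    l.flatMap (fun x => [f x]) = l.map f := by
  induction l <;> simp [*]

-- pvBitRow with one more bit: the high bit, then the old row
theorem pvBitRow_succ (n i : Nat) :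
    pvBitRow (n + 1) i = (((i >>> n) &&& 1 : Nat) : Int) :: pvBitRow n i := by
  unfold pvBitRow
  rw [List.range_succ_eq_map]
  simp only [List.map_cons, List.map_map]
  refine congrArg₂ List.cons ?_ ?_
  · norm_num
  · apply List.map_congr_left
    intro j hj
    simp only [Function.comp_apply, Nat.succ_eq_add_one]
    have h : n + 1 - 1 - (j + 1) = n - 1 - j := by omega
    rw [h]

theorem pvBitRow_add_pow (n i : Nat) (hi : i < 2 ^ n) :
    pvBitRow n (2 ^ n + i) = pvBitRow n i := by
  unfold pvBitRow
  apply List.map_congr_left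
  intro j hj
  rw [List.mem_range] at hj
  have hk : n - 1 - j < n := by omega
  set k := n - 1 - j with hkdef
  congr 1
  rw [Nat.shiftRight_eq_div_pow, Nat.shiftRight_eq_div_pow, Nat.and_one_is_mod, Nat.and_one_is_mod]
  have h1 : 2 ^ n + i = 2 ^ k * 2 ^ (n - k) + i := by
    rw [← pow_add]
    have : k + (n - k) = n := by omega
    rw [this]
  rw [h1, Nat.mul_add_div (Nat.two_pow_pos k)]
  have h2 : 2 ^ (n - k) = 2 * 2 ^ (n - k - 1) := by
    rw [← pow_succ']
    have : n - k - 1 + 1 = n - k := by omega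
    rw [this]
  omega

theorem pvBitTable_eq (n : Nat) :
    (List.range (2 ^ n)).map (pvBitRow n) = pvGoalTable n := by
  induction n with
  | zero => simp [pvGoalTable, pvBitRow]
  | succ n ih =>
    have hsplit : 2 ^ (n + 1) = 2 ^ n + 2 ^ n := by ring
    rw [hsplit, List.range_add, List.map_append, List.map_map]
    have h0 : (List.range (2 ^ n)).map (pvBitRow (n + 1)) =
        (List.range (2 ^ n)).map (fun i => (0 : Int) :: pvBitRow n i) := by
      apply List.map_congr_left
      intro i hi
      rw [List.mem_range] at hi
      rw [pvBitRow_succ]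
      congr 1
      rw [Nat.shiftRight_eq_div_pow, Nat.div_eq_of_lt hi]
      simp
    have h1 : (List.range (2 ^ n)).map (pvBitRow (n + 1) ∘ (fun i => 2 ^ n + i)) =
        (List.range (2 ^ n)).map (fun i => (1 : Int) :: pvBitRow n i) := by
      apply List.map_congr_left
      intro i hi
      rw [List.mem_range] at hi
      simp only [Function.comp]
      rw [pvBitRow_succ, pvBitRow_add_pow n i hi]
      congr 1
      rw [Nat.shiftRight_eq_div_pow, Nat.and_one_is_mod, Nat.add_comm,
        Nat.add_div_right _ (Nat.two_pow_pos n), Nat.div_eq_of_lt hi]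
      norm_num
    rw [h0, h1, show pvGoalTable (n + 1) = (pvGoalTable n).map ((0 : Int) :: ·) ++ (pvGoalTable n).map ((1 : Int) :: ·) by simp [pvGoalTable, List.flatMap_cons], ← ih]
    simp only [List.map_map]; rfl

theorem make_states_spec : Claim_equal_make_states := by
  intro na ct ng x y _ _
  unfold Spec_make_states make_states make_states_alt
  rw [← pvBitTable_eq]
  by_cases h1 : na = 1
  · subst h1
    rw [if_neg (show ¬((1 : Int) < 1 ∨ (1 : Int) > 4) by norm_num)]
    simp only [reduceIte]
    rw [pv_foldl_flatMap _ _ (fun a => _) (fun s a => pv_foldl_flatMap _ _ (fun b => _) (fun s b => pv_foldl_flatMap _ _ (fun goal => [_ ++ goal]) (fun _ _ => rfl) s) s)]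
    norm_num [show Int.toNat 2 = 2 from rfl, show Int.toNat 3 = 3 from rfl, show Int.toNat 4 = 4 from rfl, List.range_succ, pv_flatMap_single, List.map_flatMap, List.map_map, Function.comp_def]
  by_cases h2 : na = 2
  · subst h2
    rw [if_neg (show ¬((2 : Int) < 1 ∨ (2 : Int) > 4) by norm_num)]
    simp only [reduceIte]
    rw [pv_foldl_flatMap _ _ (fun a => _) (fun s a =>
      pv_foldl_flatMap _ _ (fun b => _) (fun s b =>
        pv_foldl_flatMap _ _ (fun c => _) (fun s c =>
          pv_foldl_flatMap _ _ (fun d => _) (fun s d =>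
            pv_foldl_flatMap _ _ (fun goal => [_ ++ goal]) (fun _ _ => rfl) s) s) s) s)]
    norm_num [show Int.toNat 2 = 2 from rfl, show Int.toNat 3 = 3 from rfl, show Int.toNat 4 = 4 from rfl, List.range_succ, pv_flatMap_single, List.map_flatMap, List.map_map, Function.comp_def]
  by_cases h3 : na = 3
  · subst h3
    rw [if_neg (show ¬((3 : Int) < 1 ∨ (3 : Int) > 4) by norm_num)]
    simp only [reduceIte]
    rw [pv_foldl_flatMap _ _ (fun a => _) (fun s a =>
      pv_foldl_flatMap _ _ (fun b => _) (fun s b =>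
        pv_foldl_flatMap _ _ (fun c => _) (fun s c =>
          pv_foldl_flatMap _ _ (fun d => _) (fun s d =>
            pv_foldl_flatMap _ _ (fun e => _) (fun s e =>
              pv_foldl_flatMap _ _ (fun f => _) (fun s f =>
                pv_foldl_flatMap _ _ (fun goal => [_ ++ goal]) (fun _ _ => rfl) s) s) s) s) s) s)]
    norm_num [show Int.toNat 2 = 2 from rfl, show Int.toNat 3 = 3 from rfl, show Int.toNat 4 = 4 from rfl, List.range_succ, pv_flatMap_single, List.map_flatMap, List.map_map, Function.comp_def]
  by_cases h4 : na = 4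
  · subst h4
    rw [if_neg (show ¬((4 : Int) < 1 ∨ (4 : Int) > 4) by norm_num)]
    simp only [reduceIte]
    rw [pv_foldl_flatMap _ _ (fun a => _) (fun s a =>
      pv_foldl_flatMap _ _ (fun b => _) (fun s b =>
        pv_foldl_flatMap _ _ (fun c => _) (fun s c =>
          pv_foldl_flatMap _ _ (fun d => _) (fun s d =>
            pv_foldl_flatMap _ _ (fun e => _) (fun s e =>
              pv_foldl_flatMap _ _ (fun f => _) (fun s f =>
                pv_foldl_flatMap _ _ (fun g => _) (fun s g =>
                  pv_foldl_flatMap _ _ (fun h => _) (fun s h =>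
                    pv_foldl_flatMap _ _ (fun goal => [_ ++ goal]) (fun _ _ => rfl) s) s) s) s) s) s) s) s)]
    norm_num [show Int.toNat 2 = 2 from rfl, show Int.toNat 3 = 3 from rfl, show Int.toNat 4 = 4 from rfl, List.range_succ, pv_flatMap_single, List.map_flatMap, List.map_map, Function.comp_def]
  · simp only [if_neg h1, if_neg h2, if_neg h3, if_neg h4]
    rw [if_pos (show (na < 1 ∨ na > 4) by omega)]
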